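-- pv_equiv track=rewrite | github.com/zwg19941024/ros2nav2 | Ros_ws/Nav2_ws/src/isaac_nav2/isaac_nav2/realsenseD435.py | _set_h264_hints
-- ===== SOURCE A (Python) =====
-- def _set_h264_hints(sdp, min_br, max_br):
--     lines = sdp.splitlines()
--     pts = {l.split(":")[1].split()[0] for l in lines if l.startswith("a=rtpmap:") and "H264" in l}
--
--     for pt in pts:
--         for i, l in enumerate(lines):
--             if l.startswith(f"a=fmtp:{pt} "):
--                 params = l.split(" ", 1)[1]
--                 parts = [p.strip() for p in params.split(";") if p.strip()]
--                 kv = {p.split("=")[0]: p.split("=")[1] if "=" in p else "" for p in parts}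
--                 kv["x-google-max-bitrate"] = str(max_br)
--                 kv["x-google-min-bitrate"] = str(min_br)
--                 kv["x-google-start-bitrate"] = str((min_br+max_br)//2)
--                 lines[i] = f"a=fmtp:{pt} " + ";".join([f"{k}={v}" if v else k for k,v in kv.items()])
--                 break
--     return "\r\n".join(lines)
-- ===== SOURCE B (Python) =====
-- # B: single pass over the lines with a 'done' set, instead of A's per-payload-type rescan of the whole line list.
-- def _set_h264_hints(sdp, min_br, max_br):
--     lines = sdp.splitlines()
--     pts = {l.split(":")[1].split()[0] for l in lines if l.startswith("a=rtpmap:") and "H264" in l}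
--     hints = {
--         "x-google-max-bitrate": str(max_br),
--         "x-google-min-bitrate": str(min_br),
--         "x-google-start-bitrate": str((min_br + max_br) // 2),
--     }
--     done = set()
--     out = []
--     for l in lines:
--         if l.startswith("a=fmtp:"):
--             seg = l[len("a=fmtp:"):].split(" ", 1)
--             if len(seg) == 2 and seg[0] in pts and seg[0] not in done:
--                 pt, params = seg
--                 done.add(pt)
--                 kv = {}
--                 for p in params.split(";"):
--                     p = p.strip()
--                     if p:
--                         kv[p.split("=")[0]] = p.split("=")[1] if "=" in p else ""
--                 kv.update(hints)
--                 l = "a=fmtp:" + pt + " " + ";".join(k + "=" + v if v else k for k, v in kv.items())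
--         out.append(l)
--     return "\r\n".join(out)
-- ===== Notes on version B (the rewrite author's own statement) =====
-- stated objective: alternative
-- what changed: A loops over the payload-type set and rescans the whole line list for the first matching fmtp line of each type; B makes one left-to-right pass over the lines, rewriting a fmtp line when its payload type is in pts and not yet in a 'done' set.
-- outside the precondition, e.g. on _set_h264_hints('a=rtpmap::H264', 100, 200): A raises IndexError, B raises IndexError
import Mathlib
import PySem

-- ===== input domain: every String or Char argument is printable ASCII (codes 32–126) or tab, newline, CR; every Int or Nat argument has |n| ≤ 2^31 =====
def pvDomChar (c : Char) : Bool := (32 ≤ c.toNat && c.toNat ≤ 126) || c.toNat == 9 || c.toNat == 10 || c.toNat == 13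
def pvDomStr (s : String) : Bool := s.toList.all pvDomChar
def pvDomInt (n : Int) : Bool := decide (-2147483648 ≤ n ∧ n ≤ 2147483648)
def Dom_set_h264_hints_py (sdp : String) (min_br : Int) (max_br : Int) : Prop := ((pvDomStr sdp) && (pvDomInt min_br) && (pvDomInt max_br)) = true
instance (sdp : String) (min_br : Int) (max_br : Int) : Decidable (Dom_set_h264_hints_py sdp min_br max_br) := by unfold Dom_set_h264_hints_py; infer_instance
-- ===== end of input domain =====

-- B is a single left-to-right pass over the lines with a 'done' set, instead of A's rescan of the
-- whole line list for every H264 payload type; return values are proved equal on Pre_.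

-- ===== PORT A =====

-- l.split(":")[1].split()[0]  (the "" defaults are only reached where Python raises, outside Pre_)
def pvTokA (l : String) : String :=
  (PySem.Str.split₀ (((PySem.Str.split? l ":").getD []).getD 1 "")).getD 0 ""

-- {l.split(":")[1].split()[0] for l in lines if l.startswith("a=rtpmap:") and "H264" in l}
def pvPts (lines : List String) : PySem.Set String :=
  PySem.Set.ofList ((lines.filter
    (fun l => PySem.Str.startswith l "a=rtpmap:" && PySem.Str.isIn "H264" l)).map pvTokA)

-- the body of A's `if l.startswith(f"a=fmtp:{pt} ")` branch: rebuild line i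
def pvNewLineA (mn mx : Int) (pt l : String) : String :=
  let params := ((PySem.Str.splitMax? l " " 1).getD []).getD 1 ""
  let parts := (((PySem.Str.split? params ";").getD []).map (fun p => PySem.Str.strip p)).filter
      (fun p => p != "")
  let kv := parts.foldl (fun d p =>
      d.insert (((PySem.Str.split? p "=").getD []).getD 0 "")
        (if PySem.Str.isIn "=" p then ((PySem.Str.split? p "=").getD []).getD 1 "" else ""))
      PySem.Dict.empty
  let kv := kv.insert "x-google-max-bitrate" (PySem.Int.toStr mx)
  let kv := kv.insert "x-google-min-bitrate" (PySem.Int.toStr mn)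
  let kv := kv.insert "x-google-start-bitrate" (PySem.Int.toStr (PySem.Int.floordiv (mn + mx) 2))
  "a=fmtp:" ++ pt ++ " " ++
    PySem.Str.join ";" (kv.items.map (fun q => if q.2 != "" then q.1 ++ "=" ++ q.2 else q.1))

-- A's inner `for i, l in enumerate(lines): if l.startswith(...): lines[i] = ...; break`
def pvUpdFirst (mn mx : Int) (pt : String) : List String → List String
  | [] => []
  | l :: rest =>
    if PySem.Str.startswith l ("a=fmtp:" ++ pt ++ " ") then pvNewLineA mn mx pt l :: rest
    else l :: pvUpdFirst mn mx pt rest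

def set_h264_hints_py (sdp : String) (min_br : Int) (max_br : Int) : String :=
  let lines := PySem.Str.splitlines sdp
  let pts := pvPts lines
  PySem.Str.join "\r\n" (pts.foldl (fun cur pt => pvUpdFirst min_br max_br pt cur) lines)

-- ===== PORT B =====

-- the `hints` dict B builds once
def pvHints (mn mx : Int) : PySem.Dict String String :=
  ((PySem.Dict.empty.insert "x-google-max-bitrate" (PySem.Int.toStr mx)).insert
      "x-google-min-bitrate" (PySem.Int.toStr mn)).insert
    "x-google-start-bitrate" (PySem.Int.toStr (PySem.Int.floordiv (mn + mx) 2))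

-- rebuild one matched fmtp line from its payload type and parameter string
def pvNewLineB (mn mx : Int) (pt params : String) : String :=
  let kv := ((PySem.Str.split? params ";").getD []).foldl (fun d p0 =>
      let p := PySem.Str.strip p0
      if p != "" then
        d.insert (((PySem.Str.split? p "=").getD []).getD 0 "")
          (if PySem.Str.isIn "=" p then ((PySem.Str.split? p "=").getD []).getD 1 "" else "")
      else d) PySem.Dict.empty
  let kv := (pvHints mn mx).items.foldl (fun d q => d.insert q.1 q.2) kv
  "a=fmtp:" ++ pt ++ " " ++
    PySem.Str.join ";" (kv.items.map (fun q => if q.2 != "" then q.1 ++ "=" ++ q.2 else q.1))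

-- B's single loop over the lines, carrying the 'done' set
def pvGoB (mn mx : Int) (pts : PySem.Set String) : PySem.Set String → List String → List String
  | _, [] => []
  | done, l :: rest =>
    if PySem.Str.startswith l "a=fmtp:" then
      let seg := (PySem.Str.splitMax? (PySem.Str.slice l (some 7) none) " " 1).getD []
      if seg.length == 2 && pts.contains (seg.getD 0 "") && !done.contains (seg.getD 0 "") then
        pvNewLineB mn mx (seg.getD 0 "") (seg.getD 1 "") ::
          pvGoB mn mx pts (done.add (seg.getD 0 "")) rest
      else l :: pvGoB mn mx pts done rest
    else l :: pvGoB mn mx pts done rest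

def set_h264_hints_py_alt (sdp : String) (min_br : Int) (max_br : Int) : String :=
  let lines := PySem.Str.splitlines sdp
  let pts := pvPts lines
  PySem.Str.join "\r\n" (pvGoB min_br max_br pts PySem.Set.empty lines)

-- ===== PRECONDITION & SPEC =====
-- Pre_ excludes exactly the inputs where Python A raises IndexError: an "a=rtpmap:" line containing
-- "H264" whose text between the first and second ':' is empty or all whitespace (l.split(":")[1].split()[0]).
def Pre_set_h264_hints_py (sdp : String) (min_br : Int) (max_br : Int) : Prop :=
  ∀ l ∈ PySem.Str.splitlines sdp,
    (PySem.Str.startswith l "a=rtpmap:" && PySem.Str.isIn "H264" l) = true →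
    PySem.Str.split₀ (((PySem.Str.split? l ":").getD []).getD 1 "") ≠ []
instance (sdp : String) (min_br : Int) (max_br : Int) : Decidable (Pre_set_h264_hints_py sdp min_br max_br) := by
  unfold Pre_set_h264_hints_py; infer_instance

def pvWitness_set_h264_hints_py : String × Int × Int :=
  ("v=0\r\na=rtpmap:96 H264/90000\r\na=fmtp:96 level-asymmetry-allowed=1;packetization-mode=1", 300, 2000)

def Spec_set_h264_hints_py (sdp : String) (min_br : Int) (max_br : Int) (out : String) : Prop := out = set_h264_hints_py_alt sdp min_br max_br
instance (sdp : String) (min_br : Int) (max_br : Int) (out : String) : Decidable (Spec_set_h264_hints_py sdp min_br max_br out) := by unfold Spec_set_h264_hints_py; infer_instance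

-- ===== CLAIM (what is proved, stated in full; the proofs are below) =====
def Claim_equal_set_h264_hints_py : Prop := ∀ (sdp : String) (min_br : Int) (max_br : Int), Dom_set_h264_hints_py sdp min_br max_br → Pre_set_h264_hints_py sdp min_br max_br → Spec_set_h264_hints_py sdp min_br max_br (set_h264_hints_py sdp min_br max_br)

-- ===== LEMMAS AND PROOFS =====

theorem pv_witness_ok :
    Dom_set_h264_hints_py (pvWitness_set_h264_hints_py.1) (pvWitness_set_h264_hints_py.2.1) (pvWitness_set_h264_hints_py.2.2) ∧
    Pre_set_h264_hints_py (pvWitness_set_h264_hints_py.1) (pvWitness_set_h264_hints_py.2.1) (pvWitness_set_h264_hints_py.2.2) := by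
  decide

-- splitOnMax.go with sep " " and maxsplit 1, on a string without spaces
theorem pv_sm1 (cs : List Char) : ∀ (f : Nat) (cur : List Char) (acc : List (List Char)),
    ' ' ∉ cs →
    PySem.Chars.splitOnMax.go [' '] f 1 cs cur acc = acc.reverse ++ [cur.reverse ++ cs] := by
  induction cs with
  | nil =>
      intro f cur acc _
      cases f <;> simp [PySem.Chars.splitOnMax.go]
  | cons c cs ih =>
      intro f cur acc h
      have hc : ¬ (c = ' ') := fun hh => h (by simp [hh])
      have hcs : ' ' ∉ cs := fun hh => h (by simp [hh])
      cases f with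
      | zero => simp [PySem.Chars.splitOnMax.go]
      | succ f =>
          have hpre : [' '].isPrefixOf (c :: cs) = false := by
            simp [List.isPrefixOf]; intro hh; exact absurd hh.symm hc
          simp [PySem.Chars.splitOnMax.go, hpre, ih f (c :: cur) acc hcs]

-- splitOnMax.go once maxsplit is exhausted
theorem pv_sm0 (f : Nat) (b : List Char) (acc : List (List Char)) :
    PySem.Chars.splitOnMax.go [' '] f 0 b [] acc = acc.reverse ++ [b] := by
  cases f <;> cases b <;> simp [PySem.Chars.splitOnMax.go]

-- splitOnMax.go with sep " " and maxsplit 1 on a ++ ' ' :: b with no space in a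
theorem pv_sm2 (a : List Char) : ∀ (f : Nat) (b cur : List Char) (acc : List (List Char)),
    ' ' ∉ a → a.length + 1 ≤ f →
    PySem.Chars.splitOnMax.go [' '] f 1 (a ++ ' ' :: b) cur acc =
      acc.reverse ++ [cur.reverse ++ a, b] := by
  induction a with
  | nil =>
      intro f b cur acc _ hf
      cases f with
      | zero => exact absurd hf (by simp)
      | succ f => simp [PySem.Chars.splitOnMax.go, List.isPrefixOf, pv_sm0]
  | cons c a ih =>
      intro f b cur acc h hf
      have hc : ¬ (c = ' ') := fun hh => h (by simp [hh])
      have ha : ' ' ∉ a := fun hh => h (by simp [hh])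
      have hf' : a.length + 1 ≤ f := by simp at hf; omega
      cases f with
      | zero => exact absurd hf (by simp)
      | succ f =>
          have hpre : [' '].isPrefixOf (c :: (a ++ ' ' :: b)) = false := by
            simp [List.isPrefixOf]; intro hh; exact absurd hh.symm hc
          have hf'' : a.length + 1 ≤ f := by simp at hf; omega
          simp [PySem.Chars.splitOnMax.go, hpre, ih f b (c :: cur) acc ha hf'']

theorem pv_smax1 (cs : List Char) (h : ' ' ∉ cs) :
    PySem.Chars.splitMax? cs [' '] 1 = some [cs] := by
  simp [PySem.Chars.splitMax?, PySem.Chars.splitOnMax, pv_sm1 cs _ [] [] h]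

theorem pv_smax2 (a b : List Char) (h : ' ' ∉ a) :
    PySem.Chars.splitMax? (a ++ ' ' :: b) [' '] 1 = some [a, b] := by
  have hgo := pv_sm2 a (a.length + (b.length + 1) + 1) b [] [] h (by omega)
  simp only [List.reverse_nil, List.nil_append] at hgo
  simp [PySem.Chars.splitMax?, PySem.Chars.splitOnMax, hgo]

-- words produced by split₀ contain no whitespace
theorem pv_split0_go (cs : List Char) : ∀ (cur : List Char) (acc : List (List Char)),
    (∀ w ∈ acc, ∀ c ∈ w, PySem.Chars.isspace c = false) →
    (∀ c ∈ cur, PySem.Chars.isspace c = false) →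
    ∀ w ∈ PySem.Chars.split₀.go cs cur acc, ∀ c ∈ w, PySem.Chars.isspace c = false := by
  induction cs with
  | nil =>
      intro cur acc hacc hcur w hw c hcw
      by_cases hc : cur.isEmpty = true <;> simp [PySem.Chars.split₀.go, hc] at hw
      · exact hacc w hw c hcw
      · rcases hw with hw | hw
        · exact hacc w hw c hcw
        · subst hw; exact hcur c (by simpa using hcw)
  | cons c cs ih =>
      intro cur acc hacc hcur
      by_cases hsp : PySem.Chars.isspace c = true
      · by_cases hc : cur.isEmpty = true
        · have heq : PySem.Chars.split₀.go (c :: cs) cur acc = PySem.Chars.split₀.go cs [] acc := by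
            simp [PySem.Chars.split₀.go, hsp, hc]
          rw [heq]
          exact ih [] acc hacc (by simp)
        · have heq : PySem.Chars.split₀.go (c :: cs) cur acc =
              PySem.Chars.split₀.go cs [] (cur.reverse :: acc) := by
            simp [PySem.Chars.split₀.go, hsp, hc]
          rw [heq]
          refine ih [] _ ?_ (by simp)
          intro w hw
          rcases List.mem_cons.mp hw with hw | hw
          · subst hw; intro d hd; exact hcur d (by simpa using hd)
          · exact hacc w hw
      · have hsp' : PySem.Chars.isspace c = false := eq_false_of_ne_true hsp
        have heq : PySem.Chars.split₀.go (c :: cs) cur acc =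
            PySem.Chars.split₀.go cs (c :: cur) acc := by
          simp [PySem.Chars.split₀.go, hsp']
        rw [heq]
        refine ih (c :: cur) acc hacc ?_
        intro d hd
        rcases List.mem_cons.mp hd with hd | hd
        · subst hd; exact hsp'
        · exact hcur d hd

theorem pv_tok_nospace (l : String) : ' ' ∉ (pvTokA l).toList := by
  unfold pvTokA
  unfold PySem.Str.split₀
  cases h : PySem.Chars.split₀ (((PySem.Str.split? l ":").getD []).getD 1 "").toList with
  | nil => simp
  | cons w ws =>
      intro hmem
      simp at hmem
      have hw : w ∈ PySem.Chars.split₀ (((PySem.Str.split? l ":").getD []).getD 1 "").toList := by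
        rw [h]; exact List.mem_cons_self
      have := pv_split0_go _ [] [] (by simp) (by simp) w
        (by simpa [PySem.Chars.split₀] using hw) ' ' (by simpa using hmem)
      simp [PySem.Chars.isspace] at this

theorem pv_pts_nospace (lines : List String) : ∀ x ∈ pvPts lines, ' ' ∉ x.toList := by
  intro x hx
  unfold pvPts at hx
  rw [PySem.Set.mem_ofList] at hx
  obtain ⟨l, -, rfl⟩ := List.mem_map.mp hx
  exact pv_tok_nospace l

-- two space-free tokens followed by ' ' that are both prefixes of the same list are equal
theorem pv_uniq (a : List Char) : ∀ (b l : List Char),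
    ' ' ∉ a → ' ' ∉ b → a ++ [' '] <+: l → b ++ [' '] <+: l → a = b := by
  induction a with
  | nil =>
      intro b l _ hb h1 h2
      cases b with
      | nil => rfl
      | cons d b' =>
          exfalso
          obtain ⟨t, rfl⟩ : ∃ t, l = ' ' :: t := by
            obtain ⟨t, ht⟩ := h1; exact ⟨t, by simpa using ht.symm⟩
          simp at h2
          exact hb (by simp [h2.1])
  | cons c a' ih =>
      intro b l ha hb h1 h2
      cases l with
      | nil => simp at h1
      | cons x l' =>
          have h1' : c = x ∧ a' ++ [' '] <+: l' := by simpa using h1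
          cases b with
          | nil =>
              exfalso
              have h2' : ' ' = x := by simpa using h2
              exact ha (by simp [h1'.1.trans h2'.symm])
          | cons d b' =>
              have h2' : d = x ∧ b' ++ [' '] <+: l' := by simpa using h2
              have hab : a' = b' := ih b' l' (fun hh => ha (by simp [hh]))
                (fun hh => hb (by simp [hh])) h1'.2 h2'.2
              simp [hab, h1'.1, h2'.1]

theorem pv_first_space (cs : List Char) (h : ' ' ∈ cs) :
    ∃ a b, cs = a ++ ' ' :: b ∧ ' ' ∉ a := by
  induction cs with
  | nil => simp at h
  | cons c cs ih =>
      by_cases hc : c = ' '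
      · refine ⟨[], cs, ?_, by simp⟩
        simp [hc]
      · have hmem : ' ' ∈ cs := by
          rcases List.mem_cons.mp h with h | h
          · exact absurd h.symm hc
          · exact h
        obtain ⟨a, b, rfl, ha⟩ := ih hmem
        refine ⟨c :: a, b, by simp, ?_⟩
        intro hh
        rcases List.mem_cons.mp hh with hh | hh
        · exact hc hh.symm
        · exact ha hh

theorem pv_toList_inj {x y : String} (h : x.toList = y.toList) : x = y := by
  have := congrArg String.ofList h
  simpa using this

theorem pv_contains_iff (L : PySem.Set String) (x : String) : PySem.Set.contains L x = true ↔ x ∈ L := by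
  simp [PySem.Set.contains]

theorem pv_prefix_cancel (p : List Char) : ∀ x y : List Char, (p ++ x <+: p ++ y) ↔ x <+: y := by
  induction p with
  | nil => simp
  | cons c p ih =>
      intro x y
      constructor
      · intro h
        exact (ih x y).mp (List.cons_prefix_cons.mp h).2
      · intro h
        exact List.cons_prefix_cons.mpr ⟨rfl, (ih x y).mpr h⟩

-- lift the Chars-level splitMax characterisation to Str level
theorem pv_str_splitMax (s : String) (r : List (List Char))
    (h : PySem.Chars.splitMax? s.toList [' '] 1 = some r) :
    ∃ ss : List String, PySem.Str.splitMax? s " " 1 = some ss ∧ ss.map String.toList = r := by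
  have hm := PySem.Str.splitMax?_map s " " 1
  have ht : String.toList " " = [' '] := rfl
  rw [ht, h] at hm
  cases hss : PySem.Str.splitMax? s " " 1 with
  | none => rw [hss] at hm; simp at hm
  | some ss => rw [hss] at hm; simp at hm; exact ⟨ss, rfl, hm⟩

theorem pv_newline_eq (mn mx : Int) (pt params l : String)
    (hl : l.toList = "a=fmtp:".toList ++ pt.toList ++ ' ' :: params.toList)
    (hpt : ' ' ∉ pt.toList) :
    pvNewLineA mn mx pt l = pvNewLineB mn mx pt params := by
  have hpfx : ' ' ∉ ("a=fmtp:".toList ++ pt.toList) := by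
    intro h
    rcases List.mem_append.mp h with h | h
    · revert h; decide
    · exact hpt h
  have hsm : PySem.Chars.splitMax? l.toList [' '] 1 =
      some ["a=fmtp:".toList ++ pt.toList, params.toList] := by
    rw [hl, show "a=fmtp:".toList ++ pt.toList ++ ' ' :: params.toList =
      ("a=fmtp:".toList ++ pt.toList) ++ ' ' :: params.toList by simp]
    exact pv_smax2 _ _ hpfx
  obtain ⟨ss, hss, hmap⟩ := pv_str_splitMax l _ hsm
  have hlen : ss.length = 2 := by
    have := congrArg List.length hmap; simpa using this
  obtain ⟨s1, s2, rfl⟩ := List.length_eq_two.mp hlen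
  simp only [List.map_cons, List.map_nil, List.cons.injEq, and_true] at hmap
  have hs2 : s2 = params := pv_toList_inj hmap.2
  have hparams : ((PySem.Str.splitMax? l " " 1).getD []).getD 1 "" = params := by
    rw [hss]; simp [hs2]
  simp only [pvNewLineA, pvNewLineB]
  rw [hparams]
  have hhints : (pvHints mn mx).items =
      [("x-google-max-bitrate", PySem.Int.toStr mx),
       ("x-google-min-bitrate", PySem.Int.toStr mn),
       ("x-google-start-bitrate", PySem.Int.toStr (PySem.Int.floordiv (mn + mx) 2))] := rfl
  rw [hhints, List.foldl_filter, List.foldl_map]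
  rfl

-- helper facts about pvUpdFirst folds
theorem pv_fold_nil (mn mx : Int) (ptl : List String) :
    ptl.foldl (fun cur pt => pvUpdFirst mn mx pt cur) [] = [] := by
  induction ptl with
  | nil => rfl
  | cons p ptl ih => simpa [pvUpdFirst] using ih

theorem pv_upd_pass (mn mx : Int) (p l : String) (ls : List String)
    (hp : PySem.Str.startswith l ("a=fmtp:" ++ p ++ " ") = false) :
    pvUpdFirst mn mx p (l :: ls) = l :: pvUpdFirst mn mx p ls := by
  simp only [pvUpdFirst]
  rw [hp]
  simp

theorem pv_upd_hit (mn mx : Int) (p l : String) (ls : List String)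
    (hp : PySem.Str.startswith l ("a=fmtp:" ++ p ++ " ") = true) :
    pvUpdFirst mn mx p (l :: ls) = pvNewLineA mn mx p l :: ls := by
  simp only [pvUpdFirst]
  rw [hp]
  simp

theorem pv_fold_pass (mn mx : Int) (u : List String) : ∀ (l : String) (ls : List String),
    (∀ pt ∈ u, PySem.Str.startswith l ("a=fmtp:" ++ pt ++ " ") = false) →
    u.foldl (fun cur pt => pvUpdFirst mn mx pt cur) (l :: ls) =
      l :: u.foldl (fun cur pt => pvUpdFirst mn mx pt cur) ls := by
  induction u with
  | nil => intro l ls _; rfl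
  | cons p u ih =>
      intro l ls h
      simp only [List.foldl_cons]
      rw [pv_upd_pass mn mx p l ls (h p (by simp))]
      exact ih l _ (fun pt hpt => h pt (by simp [hpt]))

-- startswith / matches bridge
theorem pv_match_iff (pt l : String) :
    PySem.Str.startswith l ("a=fmtp:" ++ pt ++ " ") = true ↔
      ("a=fmtp:".toList ++ (pt.toList ++ [' '])) <+: l.toList := by
  rw [PySem.Str.startswith_eq, PySem.Chars.startswith_iff]
  constructor <;> intro h <;> simpa using h

-- a line of the shape "a=fmtp:" ++ a ++ " " ++ bb is matched exactly by the token a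
theorem pv_uniq_line (pt x : String) (a bb : List Char)
    (hx : x.toList = "a=fmtp:".toList ++ (a ++ ' ' :: bb))
    (hptn : ' ' ∉ pt.toList) (han : ' ' ∉ a)
    (hm : PySem.Str.startswith x ("a=fmtp:" ++ pt ++ " ") = true) : pt.toList = a := by
  have h1 : pt.toList ++ [' '] <+: a ++ ' ' :: bb := by
    have hh := (pv_match_iff pt x).mp hm
    rw [hx] at hh
    exact (pv_prefix_cancel "a=fmtp:".toList _ _).mp hh
  have h2 : a ++ [' '] <+: a ++ ' ' :: bb := ⟨bb, by simp⟩
  exact pv_uniq _ _ _ hptn han h1 h2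

-- one unfold step of pvGoB on a cons cell
theorem pv_goB_cons (mn mx : Int) (P done : PySem.Set String) (l : String) (ls : List String) :
    pvGoB mn mx P done (l :: ls) =
      if PySem.Str.startswith l "a=fmtp:" then
        if ((PySem.Str.splitMax? (PySem.Str.slice l (some 7) none) " " 1).getD []).length == 2 &&
           P.contains (((PySem.Str.splitMax? (PySem.Str.slice l (some 7) none) " " 1).getD []).getD 0 "") &&
           !done.contains (((PySem.Str.splitMax? (PySem.Str.slice l (some 7) none) " " 1).getD []).getD 0 "") then
          pvNewLineB mn mx
              (((PySem.Str.splitMax? (PySem.Str.slice l (some 7) none) " " 1).getD []).getD 0 "")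
              (((PySem.Str.splitMax? (PySem.Str.slice l (some 7) none) " " 1).getD []).getD 1 "") ::
            pvGoB mn mx P
              (done.add (((PySem.Str.splitMax? (PySem.Str.slice l (some 7) none) " " 1).getD []).getD 0 ""))
              ls
        else l :: pvGoB mn mx P done ls
      else l :: pvGoB mn mx P done ls := rfl

-- ===== the main induction =====
set_option maxHeartbeats 1000000 in
theorem pv_main (mn mx : Int) (P : PySem.Set String) (hP : ∀ x ∈ P, ' ' ∉ x.toList) :
    ∀ (ls ptl : List String) (done : PySem.Set String),
    ptl.Nodup → (∀ x, x ∈ ptl ↔ (x ∈ P ∧ x ∉ done)) →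
    ptl.foldl (fun cur pt => pvUpdFirst mn mx pt cur) ls = pvGoB mn mx P done ls := by
  intro ls
  induction ls with
  | nil =>
      intro ptl done _ _
      rw [show pvGoB mn mx P done [] = [] from rfl]
      exact pv_fold_nil mn mx ptl
  | cons l ls ih =>
      intro ptl done hnd hinv
      by_cases hs : PySem.Str.startswith l "a=fmtp:" = true
      · -- line has the fmtp prefix
        obtain ⟨rL, hrl⟩ : ∃ rL, l.toList = "a=fmtp:".toList ++ rL := by
          rw [PySem.Str.startswith_eq, PySem.Chars.startswith_iff] at hs
          obtain ⟨t, ht⟩ := hs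
          exact ⟨t, ht.symm⟩
        have hslice : (PySem.Str.slice l (some 7) none).toList = rL := by
          rw [PySem.Str.toList_slice, PySem.Chars.slice_eq_listSlice]
          rw [PySem.List.slice_from _ (by norm_num : (0:Int) ≤ 7)]
          rw [hrl, show ((7:Int).toNat) = ("a=fmtp:".toList).length from rfl, List.drop_left]
        by_cases hsp : ' ' ∈ rL
        · obtain ⟨a, b, rfl, ha⟩ := pv_first_space rL hsp
          obtain ⟨ss, hss, hmap⟩ := pv_str_splitMax (PySem.Str.slice l (some 7) none) _
            (by rw [hslice]; exact pv_smax2 a b ha)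
          have hlen : ss.length = 2 := by
            have := congrArg List.length hmap; simpa using this
          obtain ⟨sa, sb, rfl⟩ := List.length_eq_two.mp hlen
          simp only [List.map_cons, List.map_nil, List.cons.injEq, and_true] at hmap
          have hsa : sa.toList = a := hmap.1
          have hsb : sb.toList = b := hmap.2
          have hseg : (PySem.Str.splitMax? (PySem.Str.slice l (some 7) none) " " 1).getD [] = [sa, sb] := by
            rw [hss]; rfl
          have hldec : l.toList = "a=fmtp:".toList ++ (sa.toList ++ ' ' :: sb.toList) := by
            rw [hrl, hsa, hsb]
          have hanosp : ' ' ∉ sa.toList := by rw [hsa]; exact ha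
          have huniq : ∀ pt : String, ' ' ∉ pt.toList →
              PySem.Str.startswith l ("a=fmtp:" ++ pt ++ " ") = true → pt = sa := by
            intro pt hptn hm
            exact pv_toList_inj ((pv_uniq_line pt l a b (by rw [hrl]) hptn ha hm).trans hsa.symm)
          have hmsa : PySem.Str.startswith l ("a=fmtp:" ++ sa ++ " ") = true := by
            rw [pv_match_iff, hldec]
            exact (pv_prefix_cancel "a=fmtp:".toList _ _).mpr ⟨sb.toList, by simp⟩
          by_cases hcond : (P.contains sa && !done.contains sa) = true
          · -- this payload type gets rewritten here
            have hcc : P.contains sa = true ∧ done.contains sa = false := by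
              simpa using hcond
            have hsa_inP : sa ∈ P := (pv_contains_iff P sa).mp hcc.1
            have hsa_nd : sa ∉ done := by
              intro hmem
              have hmm := (pv_contains_iff done sa).mpr hmem
              rw [hcc.2] at hmm
              simp at hmm
            have hsa_ptl : sa ∈ ptl := (hinv sa).mpr ⟨hsa_inP, hsa_nd⟩
            obtain ⟨u, w, rfl⟩ := List.append_of_mem hsa_ptl
            have hmid := List.nodup_middle.mp hnd
            have hmid1 : sa ∉ u ++ w := (List.nodup_cons.mp hmid).1
            have hmid2 : (u ++ w).Nodup := (List.nodup_cons.mp hmid).2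
            have hgood : ∀ pt ∈ u ++ sa :: w, ' ' ∉ pt.toList :=
              fun pt hpt => hP pt ((hinv pt).mp hpt).1
            have hu_pass : ∀ pt ∈ u, PySem.Str.startswith l ("a=fmtp:" ++ pt ++ " ") = false := by
              intro pt hptu
              apply eq_false_of_ne_true
              intro htrue
              have : pt = sa := huniq pt (hgood pt (by simp [hptu])) htrue
              subst this
              exact hmid1 (by simp [hptu])
            have hw_pass : ∀ pt ∈ w,
                PySem.Str.startswith (pvNewLineA mn mx sa l) ("a=fmtp:" ++ pt ++ " ") = false := by
              intro pt hptw
              apply eq_false_of_ne_true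
              intro htrue
              obtain ⟨J, hJ⟩ : ∃ J, pvNewLineA mn mx sa l = "a=fmtp:" ++ sa ++ " " ++ J := ⟨_, rfl⟩
              have hnewdec : (pvNewLineA mn mx sa l).toList =
                  "a=fmtp:".toList ++ (sa.toList ++ ' ' :: J.toList) := by
                rw [hJ]; simp
              have heq : pt.toList = sa.toList :=
                pv_uniq_line pt _ sa.toList J.toList hnewdec
                  (hgood pt (by simp [hptw])) hanosp htrue
              have : pt = sa := pv_toList_inj heq
              subst this
              exact hmid1 (by simp [hptw])
            -- A side
            have hA : (u ++ sa :: w).foldl (fun cur pt => pvUpdFirst mn mx pt cur) (l :: ls) =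
                pvNewLineA mn mx sa l ::
                  (u ++ w).foldl (fun cur pt => pvUpdFirst mn mx pt cur) ls := by
              rw [List.foldl_append, pv_fold_pass mn mx u l ls hu_pass]
              simp only [List.foldl_cons]
              rw [pv_upd_hit mn mx sa l _ hmsa]
              rw [pv_fold_pass mn mx w _ _ hw_pass]
              rw [List.foldl_append]
            -- B side
            have hB : pvGoB mn mx P done (l :: ls) =
                pvNewLineB mn mx sa sb :: pvGoB mn mx P (done.add sa) ls := by
              have hguard : ([sa, sb].length == 2 && P.contains ([sa, sb].getD 0 "") &&
                  !done.contains ([sa, sb].getD 0 "")) = true := by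
                show (true && P.contains sa && !done.contains sa) = true
                rw [Bool.true_and]; exact hcond
              rw [pv_goB_cons, if_pos hs, hseg, if_pos hguard]
              simp only [List.getD_cons_zero, List.getD_cons_succ]
            have hinv' : ∀ x, x ∈ u ++ w ↔ (x ∈ P ∧ x ∉ done.add sa) := by
              intro x
              constructor
              · intro hx
                have hx' : x ∈ u ++ sa :: w := by
                  rcases List.mem_append.mp hx with hx | hx <;> simp [hx]
                have hxne : x ≠ sa := fun hh => hmid1 (hh ▸ hx)
                obtain ⟨hxP, hxd⟩ := (hinv x).mp hx'
                refine ⟨hxP, ?_⟩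
                intro hmem
                rcases (PySem.Set.mem_add done sa x).mp hmem with hmem | hmem
                · exact hxd hmem
                · exact hxne hmem
              · rintro ⟨hxP, hxd⟩
                have hxd' : x ∉ done := fun hh => hxd ((PySem.Set.mem_add done sa x).mpr (Or.inl hh))
                have hxne : x ≠ sa := fun hh => hxd ((PySem.Set.mem_add done sa x).mpr (Or.inr hh))
                have := (hinv x).mpr ⟨hxP, hxd'⟩
                rcases List.mem_append.mp this with hx | hx
                · simp [hx]
                · rcases List.mem_cons.mp hx with hx | hx
                  · exact absurd hx hxne
                  · simp [hx]
            rw [hA, hB, pv_newline_eq mn mx sa sb l hldec hanosp,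
              ih (u ++ w) (done.add sa) hmid2 hinv']
          · -- token not (in pts and fresh): both sides keep the line
            have hcondf : (P.contains sa && !done.contains sa) = false := eq_false_of_ne_true hcond
            have hnm : ∀ pt ∈ ptl, PySem.Str.startswith l ("a=fmtp:" ++ pt ++ " ") = false := by
              intro pt hpt
              apply eq_false_of_ne_true
              intro htrue
              have : pt = sa := huniq pt (hP pt ((hinv pt).mp hpt).1) htrue
              subst this
              obtain ⟨hxP, hxd⟩ := (hinv pt).mp hpt
              have h1 : P.contains pt = true := (pv_contains_iff P pt).mpr hxP
              have h2 : done.contains pt = false := by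
                cases hh : done.contains pt
                · rfl
                · exact absurd ((pv_contains_iff done pt).mp hh) hxd
              rw [h1, h2] at hcondf
              simp at hcondf
            rw [pv_fold_pass mn mx ptl l ls hnm]
            rw [pv_goB_cons, if_pos hs, hseg]
            have : ([sa, sb].length == 2 && P.contains ([sa, sb].getD 0 "") &&
                !done.contains ([sa, sb].getD 0 "")) = false := by
              simp only [List.length_cons, List.length_nil, List.getD_cons_zero]
              simpa using hcondf
            rw [this]
            simp only [Bool.false_eq_true, if_false]
            rw [ih ptl done hnd hinv]
        · -- no space after the prefix: nothing can match
          obtain ⟨ss, hss, hmap⟩ := pv_str_splitMax (PySem.Str.slice l (some 7) none) _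
            (by rw [hslice]; exact pv_smax1 rL hsp)
          have hlen1 : ss.length = 1 := by
            have := congrArg List.length hmap; simpa using this
          have hnm : ∀ pt ∈ ptl, PySem.Str.startswith l ("a=fmtp:" ++ pt ++ " ") = false := by
            intro pt _
            apply eq_false_of_ne_true
            intro htrue
            have hh := (pv_match_iff pt l).mp htrue
            rw [hrl] at hh
            have h2 := (pv_prefix_cancel "a=fmtp:".toList _ _).mp hh
            exact hsp (h2.subset (by simp))
          rw [pv_fold_pass mn mx ptl l ls hnm]
          rw [pv_goB_cons, if_pos hs]
          have hl1 : (((PySem.Str.splitMax? (PySem.Str.slice l (some 7) none) " " 1).getD []).length == 2) = false := by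
            rw [hss]
            simp [hlen1]
          rw [show ∀ (b1 b2 : Bool), (((PySem.Str.splitMax? (PySem.Str.slice l (some 7) none) " " 1).getD []).length == 2 && b1 && b2)
              = (false && b1 && b2) from fun b1 b2 => by rw [hl1]]
          simp only [Bool.false_and, Bool.false_eq_true, if_false]
          rw [ih ptl done hnd hinv]
      · -- no fmtp prefix: both sides keep the line
        have hsf : PySem.Str.startswith l "a=fmtp:" = false := eq_false_of_ne_true hs
        have hnm : ∀ pt ∈ ptl, PySem.Str.startswith l ("a=fmtp:" ++ pt ++ " ") = false := by
          intro pt _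
          apply eq_false_of_ne_true
          intro htrue
          have hh := (pv_match_iff pt l).mp htrue
          have : "a=fmtp:".toList <+: l.toList := (List.prefix_append _ _).trans hh
          rw [PySem.Str.startswith_eq] at hsf
          rw [(PySem.Chars.startswith_iff _ _).mpr this] at hsf
          simp at hsf
        rw [pv_fold_pass mn mx ptl l ls hnm]
        rw [pv_goB_cons, hsf]
        simp only [Bool.false_eq_true, if_false]
        rw [ih ptl done hnd hinv]

-- ===== VERDICT (by name: the statement is the Claim_ definition above) =====
theorem set_h264_hints_py_spec : Claim_equal_set_h264_hints_py := by
  intro sdp mn mx _ _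
  unfold Spec_set_h264_hints_py set_h264_hints_py set_h264_hints_py_alt
  show PySem.Str.join "\r\n"
      ((pvPts (PySem.Str.splitlines sdp)).foldl (fun cur pt => pvUpdFirst mn mx pt cur)
        (PySem.Str.splitlines sdp)) =
    PySem.Str.join "\r\n"
      (pvGoB mn mx (pvPts (PySem.Str.splitlines sdp)) PySem.Set.empty (PySem.Str.splitlines sdp))
  rw [pv_main mn mx (pvPts (PySem.Str.splitlines sdp)) (pv_pts_nospace _)
    (PySem.Str.splitlines sdp) (pvPts (PySem.Str.splitlines sdp)) PySem.Set.empty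
    (PySem.Set.nodup_ofList _) (by intro x; simp [PySem.Set.empty])]
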